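-- pv_equiv track=rewrite | github.com/jmparis/advent-of-code | 2025/Day 10 - Factory/part2-Opus-45.py | parse_machine_line
-- ===== SOURCE A (Python) =====
-- from typing import List, Tuple, Optional
--
-- def parse_machine_line(line: str) -> Tuple[List[int], List[List[int]]]:
--     """Parse a machine configuration line for Part 2 (joltage requirements)."""
--     start_brace = line.find('{')
--     end_brace = line.find('}')
--     joltage_str = line[start_brace + 1:end_brace]
--
--     if joltage_str:
--         targets = [int(x.strip()) for x in joltage_str.split(',')]
--     else:
--         targets = []
--
--     button_configs = []
--     start_paren = line.find('(')
--     while start_paren != -1: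
--         end_paren = line.find(')', start_paren)
--         if end_paren == -1:
--             break
--
--         button_str = line[start_paren + 1:end_paren]
--         if button_str:
--             if ',' in button_str:
--                 indices = [int(x.strip()) for x in button_str.split(',')]
--             else:
--                 indices = [int(button_str)]
--             button_configs.append(indices)
--
--         start_paren = line.find('(', end_paren)
--
--     return targets, button_configs
-- ===== SOURCE B (Python) =====
-- from typing import List, Tuple
--
-- def parse_machine_line(line: str) -> Tuple[List[int], List[List[int]]]:
--     """Parse a machine configuration line for Part 2 (joltage requirements)."""
--     start_brace = line.find('{')
--     end_brace = line.find('}')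
--     joltage_str = line[start_brace + 1:end_brace]
--
--     if joltage_str:
--         targets = [int(x.strip()) for x in joltage_str.split(',')]
--     else:
--         targets = []
--
--     # One character-at-a-time pass with an explicit open/closed state instead
--     # of repeated index scans with str.find.
--     button_configs = []
--     buf = None  # None = outside a group; a string = chars since the last '('
--     for ch in line:
--         if buf is None:
--             if ch == '(':
--                 buf = ''
--         elif ch == ')':
--             if buf:
--                 if ',' in buf:
--                     button_configs.append([int(x.strip()) for x in buf.split(',')])
--                 else:
--                     button_configs.append([int(buf)])
--             buf = None
--         else:
--             buf += ch
--     return targets, button_configs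
-- ===== Notes on version B (the rewrite author's own statement) =====
-- stated objective: alternative
-- what changed: The while-loop that repeatedly rescans the line with str.find to pair each opening parenthesis with the next closing one is replaced by a single character-at-a-time pass with an explicit open/closed accumulator state; the brace extraction and token parsing are unchanged.
import Mathlib
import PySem

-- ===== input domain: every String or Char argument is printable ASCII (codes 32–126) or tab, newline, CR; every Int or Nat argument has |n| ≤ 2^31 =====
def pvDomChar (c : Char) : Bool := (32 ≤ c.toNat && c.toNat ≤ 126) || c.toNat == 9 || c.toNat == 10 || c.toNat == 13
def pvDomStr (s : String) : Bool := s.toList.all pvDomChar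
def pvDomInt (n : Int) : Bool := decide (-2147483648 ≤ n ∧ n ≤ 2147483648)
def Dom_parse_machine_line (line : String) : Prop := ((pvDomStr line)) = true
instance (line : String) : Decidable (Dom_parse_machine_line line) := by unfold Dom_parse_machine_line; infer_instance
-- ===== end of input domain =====

-- B replaces A's str.find-driven while loop over paren groups by a single character pass
-- with an open/closed accumulator state (objective: alternative; same asymptotic cost).

-- ===== PORT A =====
-- shared token parsing: [int(x.strip()) for x in s.split(',')]
def pvParseCSV (s : List Char) : List Int :=
  (PySem.Chars.splitOn s [',']).map
    (fun x => (PySem.Int.ofChars? (PySem.Chars.strip x)).getD 0)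
    -- .getD 0 is unreachable under Pre_ (int() would raise ValueError there)

-- shared inner branch: indices for one non-empty button_str
def pvGroupVal (bs : List Char) : List Int :=
  if PySem.Chars.isIn [','] bs then pvParseCSV bs
  else [(PySem.Int.ofChars? bs).getD 0]   -- .getD 0 unreachable under Pre_

-- shared brace extraction (B's Python copies A's verbatim)
def pvJoltage (cs : List Char) : List Int :=
  let start_brace := PySem.Chars.find cs ['{']
  let end_brace := PySem.Chars.find cs ['}']
  let joltage_str := PySem.Chars.slice cs (some (start_brace + 1)) (some end_brace)
  if joltage_str ≠ [] then pvParseCSV joltage_str else []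

-- A's while loop; fuel (cs.length + 1) only makes the recursion total: each
-- iteration strictly increases start_paren, so the fuel is never exhausted
def pvALoop (cs : List Char) (fuel : Nat) (start_paren : Int) (acc : List (List Int)) :
    List (List Int) :=
  match fuel with
  | 0 => acc
  | fuel + 1 =>
    if start_paren = -1 then acc
    else
      let end_paren := PySem.Chars.findFrom cs [')'] start_paren
      if end_paren = -1 then acc
      else
        let bs := PySem.Chars.slice cs (some (start_paren + 1)) (some end_paren)
        let acc' := if bs ≠ [] then acc ++ [pvGroupVal bs] else acc
        pvALoop cs fuel (PySem.Chars.findFrom cs ['('] end_paren) acc'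

def parse_machine_line (line : String) : List Int × List (List Int) :=
  let cs := line.toList
  (pvJoltage cs, pvALoop cs (cs.length + 1) (PySem.Chars.find cs ['(']) [])

-- ===== PORT B =====
-- one step of B's for-loop: state = (button_configs, buf); buf = none ↔ outside a group
def pvBStep (st : List (List Int) × Option (List Char)) (c : Char) :
    List (List Int) × Option (List Char) :=
  match st.2 with
  | none => if c = '(' then (st.1, some []) else st
  | some buf =>
    if c = ')' then (if buf ≠ [] then st.1 ++ [pvGroupVal buf] else st.1, none)
    else (st.1, some (buf ++ [c]))

def parse_machine_line_alt (line : String) : List Int × List (List Int) :=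
  let cs := line.toList
  (pvJoltage cs, (cs.foldl pvBStep ([], none)).1)

-- ===== PRECONDITION & SPEC =====
-- Pre_ helpers (independent of the ports): the brace slice, the completed paren
-- groups of the line, and "every comma token is an int literal"
def pvJoltageStr (cs : List Char) : List Char :=
  PySem.Chars.slice cs (some (PySem.Chars.find cs ['{'] + 1)) (some (PySem.Chars.find cs ['}']))

def pvPreGroups : List Char → Option (List Char) → List (List Char)
  | [], _ => []
  | c :: rest, none => if c = '(' then pvPreGroups rest (some []) else pvPreGroups rest none
  | c :: rest, some buf =>
    if c = ')' then buf :: pvPreGroups rest none else pvPreGroups rest (some (buf ++ [c]))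

def pvTokensOk (s : List Char) : Prop :=
  ∀ x ∈ PySem.Chars.splitOn s [','], (PySem.Int.ofChars? (PySem.Chars.strip x)).isSome = true

-- Pre_ excludes exactly the lines on which Python's int() raises ValueError (A returns on no
-- other excluded input; B raises there too): every comma-separated token of the brace slice
-- and of each non-empty completed ()-group must be an int literal.
def Pre_parse_machine_line (line : String) : Prop :=
  (pvJoltageStr line.toList ≠ [] → pvTokensOk (pvJoltageStr line.toList)) ∧
  ∀ g ∈ pvPreGroups line.toList none, g ≠ [] →
    (if PySem.Chars.isIn [','] g then pvTokensOk g
     else (PySem.Int.ofChars? g).isSome = true)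
instance (line : String) : Decidable (Pre_parse_machine_line line) := by
  unfold Pre_parse_machine_line pvTokensOk; infer_instance

def pvWitness_parse_machine_line : String := "{3, 5} (1,2) (0)"

def Spec_parse_machine_line (line : String) (out : List Int × List (List Int)) : Prop :=
  out = parse_machine_line_alt line
instance (line : String) (out : List Int × List (List Int)) :
    Decidable (Spec_parse_machine_line line out) := by
  unfold Spec_parse_machine_line; infer_instance

-- ===== CLAIM (what is proved, stated in full; the proofs are below) =====
def Claim_equal_parse_machine_line : Prop :=
  ∀ (line : String), Dom_parse_machine_line line → Pre_parse_machine_line line →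
    Spec_parse_machine_line line (parse_machine_line line)

-- ===== LEMMAS AND PROOFS =====

lemma pv_go_cons (sub : List Char) (h : Char) (t : List Char) (m : Nat) :
    PySem.Chars.find.go sub (h :: t) m =
      (if sub.isPrefixOf (h :: t) then (m : Int) else PySem.Chars.find.go sub t (m + 1)) := rfl

lemma pv_go_nonneg (sub t : List Char) (h : PySem.Chars.find.go sub t 0 ≠ -1) :
    0 ≤ PySem.Chars.find.go sub t 0 := by
  have h1 : PySem.Chars.find t sub ≠ -1 := h
  rw [PySem.Chars.find_ne_neg_one_iff] at h1
  exact (PySem.Chars.find_nonneg_iff t sub).mpr h1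

lemma pv_find_cons_aux (sub : List Char) (t : List Char) :
    ∀ k : Nat, PySem.Chars.find.go sub t k =
      if PySem.Chars.find.go sub t 0 = -1 then -1
      else (k : Int) + PySem.Chars.find.go sub t 0 := by
  induction t with
  | nil =>
    intro k
    simp [PySem.Chars.find.go]
    split_ifs <;> simp
  | cons h t ih =>
    intro k
    rw [pv_go_cons, pv_go_cons]
    by_cases hp : sub.isPrefixOf (h :: t)
    · simp [hp]
    · simp only [hp, Bool.false_eq_true, if_false]
      rw [ih (k + 1), ih 1]
      by_cases h1 : PySem.Chars.find.go sub t 0 = -1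
      · simp [h1]
      · have h0 := pv_go_nonneg sub t h1
        have h2 : ¬ ((1 : Int) + PySem.Chars.find.go sub t 0 = -1) := by omega
        simp only [if_neg h1]
        push_cast at h2 ⊢
        simp only [if_neg h2]
        ring

lemma pv_find_singleton_cons (c d : Char) (t : List Char) :
    PySem.Chars.find (c :: t) [d] =
      if c = d then 0
      else if PySem.Chars.find t [d] = -1 then -1 else 1 + PySem.Chars.find t [d] := by
  show PySem.Chars.find.go [d] (c :: t) 0 = _
  rw [pv_go_cons, pv_find_cons_aux [d] t 1]
  by_cases hcd : c = d
  · simp [hcd, List.isPrefixOf]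
  · have hf : ([d].isPrefixOf (c :: t)) = false := by
      simp [List.isPrefixOf]
      exact fun h => hcd h.symm
    simp only [hf, Bool.false_eq_true, if_false, hcd]
    norm_num [PySem.Chars.find]

lemma pv_singleton_infix {c : Char} {l : List Char} : [c] <:+: l ↔ c ∈ l := by
  constructor
  · intro h; exact h.subset (List.mem_singleton_self c)
  · intro h
    obtain ⟨l1, l2, rfl⟩ := List.append_of_mem h
    exact ⟨l1, l2, by simp⟩

lemma pv_foldl_none_no_open (l : List Char) (acc : List (List Int)) (h : '(' ∉ l) :
    List.foldl pvBStep (acc, none) l = (acc, none) := by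
  induction l with
  | nil => rfl
  | cons c t ih =>
    simp only [List.mem_cons, not_or] at h
    simp only [List.foldl_cons, pvBStep, if_neg (fun hc : c = '(' => h.1 hc.symm)]
    exact ih h.2

lemma pv_foldl_some_no_close (l : List Char) :
    ∀ (acc : List (List Int)) (buf : List Char), ')' ∉ l →
    List.foldl pvBStep (acc, some buf) l = (acc, some (buf ++ l)) := by
  induction l with
  | nil => intro acc buf _; simp
  | cons c t ih =>
    intro acc buf h
    simp only [List.mem_cons, not_or] at h
    simp only [List.foldl_cons, pvBStep, if_neg (fun hc : c = ')' => h.1 hc.symm)]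
    rw [ih acc (buf ++ [c]) h.2]
    simp

-- from 0 ≤ find l [c]: decomposition of l at the first occurrence
lemma pv_find_decomp (l : List Char) (c : Char) (h : 0 ≤ PySem.Chars.find l [c]) :
    l.drop (PySem.Chars.find l [c]).toNat = c :: l.drop ((PySem.Chars.find l [c]).toNat + 1) ∧
    c ∉ l.take (PySem.Chars.find l [c]).toNat ∧
    (PySem.Chars.find l [c]).toNat < l.length := by
  obtain ⟨hpre, hmin⟩ := PySem.Chars.find_spec (s := l) (sub := [c]) h
  set j := (PySem.Chars.find l [c]).toNat with hj
  obtain ⟨s, hs⟩ := hpre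
  have hdrop : l.drop j = c :: s := by simpa using hs.symm
  have hlen : j < l.length := by
    by_contra hc
    have : l.drop j = [] := List.drop_eq_nil_of_le (by omega)
    rw [this] at hdrop; exact absurd hdrop (by simp)
  refine ⟨?_, ?_, hlen⟩
  · rw [hdrop]
    have : l.drop (j + 1) = (l.drop j).tail := by rw [← List.tail_drop]
    rw [this, hdrop]
    rfl
  · intro hmem
    obtain ⟨i, hi, hgi⟩ := List.getElem_of_mem hmem
    simp only [List.length_take] at hi
    have hil : i < l.length := by omega
    have hij : i < j := by omega
    have hgi' : l[i] = c := by
      simpa [List.getElem_take] using hgi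
    exact hmin i hij ⟨l.drop (i + 1), by
      rw [List.drop_eq_getElem_cons hil, hgi']; simp⟩

lemma pv_main (cs : List Char) :
    ∀ n k fuel acc, k ≤ cs.length → cs.length - k ≤ n → cs.length + 1 - k ≤ fuel →
      pvALoop cs fuel (PySem.Chars.findFrom cs ['('] (k : Int)) acc =
        (List.foldl pvBStep (acc, none) (cs.drop k)).1 := by
  intro n
  induction n with
  | zero =>
    intro k fuel acc hk hn hf
    -- k = cs.length: suffix empty
    have hkl : k = cs.length := by omega
    have hdrop : cs.drop k = [] := List.drop_eq_nil_of_le (by omega)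
    have hfind : PySem.Chars.find (cs.drop k) ['('] = -1 := by
      rw [PySem.Chars.find_eq_neg_one_iff, pv_singleton_infix, hdrop]; simp
    rw [PySem.Chars.findFrom_natCast cs ['('] k hk, hfind, if_pos rfl, hdrop]
    obtain ⟨f, rfl⟩ : ∃ f, fuel = f + 1 := ⟨fuel - 1, by omega⟩
    simp [pvALoop]
  | succ n ih =>
    intro k fuel acc hk hn hf
    obtain ⟨f, rfl⟩ : ∃ f, fuel = f + 1 := ⟨fuel - 1, by omega⟩
    rw [PySem.Chars.findFrom_natCast cs ['('] k hk]
    by_cases hA : PySem.Chars.find (cs.drop k) ['('] = -1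
    · -- no '(' in the suffix: A's loop exits, B's pass never opens a group
      have hno : '(' ∉ cs.drop k := by
        rw [PySem.Chars.find_eq_neg_one_iff, pv_singleton_infix] at hA; exact hA
      rw [if_pos hA, pv_foldl_none_no_open _ _ hno]
      simp [pvALoop]
    · -- first '(' of the suffix at absolute position p = k + r
      have hr0 : 0 ≤ PySem.Chars.find (cs.drop k) ['('] := by
        have := (PySem.Chars.find_ne_neg_one_iff (cs.drop k) ['(']).mp hA
        exact (PySem.Chars.find_nonneg_iff _ _).mpr this
      rw [if_neg hA]
      obtain ⟨hdropR, hnoP, hrlen⟩ := pv_find_decomp (cs.drop k) '(' hr0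
      set r := (PySem.Chars.find (cs.drop k) ['(']).toNat with hrdef
      set p := k + r with hpdef
      have hcast : (k : Int) + PySem.Chars.find (cs.drop k) ['('] = (p : Int) := by omega
      rw [hcast]
      have hlenk : (cs.drop k).length = cs.length - k := by simp
      have hp_lt : p < cs.length := by omega
      have hdropP : cs.drop p = '(' :: cs.drop (p + 1) := by
        have h1 : (cs.drop k).drop r = cs.drop p := by
          rw [List.drop_drop]
        have h2 : (cs.drop k).drop (r + 1) = cs.drop (p + 1) := by
          rw [List.drop_drop]; congr 1
        rw [← h1, ← h2]; exact hdropR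
      have hsplitK : cs.drop k = (cs.drop k).take r ++ '(' :: cs.drop (p + 1) := by
        conv_lhs => rw [← List.take_append_drop r (cs.drop k)]
        congr 1
        rw [List.drop_drop, show k + r = p from rfl]
        exact hdropP
      -- B consumes the prefix up to and including this '('
      have hBpre : ∀ a : List (List Int),
          List.foldl pvBStep (a, none) (cs.drop k) =
          List.foldl pvBStep (a, some []) (cs.drop (p + 1)) := by
        intro a
        rw [hsplitK, List.foldl_append, pv_foldl_none_no_open _ _ hnoP]
        simp [pvBStep]
      -- A unfolds one iteration
      simp only [pvALoop]
      rw [if_neg (by omega : ¬ ((p : Int) = -1))]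
      rw [PySem.Chars.findFrom_natCast cs [')'] p (by omega)]
      rw [hdropP, pv_find_singleton_cons]
      rw [if_neg (by decide : ¬ ('(' = ')'))]
      by_cases hq : PySem.Chars.find (cs.drop (p + 1)) [')'] = -1
      · -- no closing paren after p: A breaks; B never closes the group
        rw [if_pos hq, hBpre]
        have hnoC : ')' ∉ cs.drop (p + 1) := by
          rw [PySem.Chars.find_eq_neg_one_iff, pv_singleton_infix] at hq; exact hq
        rw [pv_foldl_some_no_close _ _ _ hnoC]
        simp
      · -- closing paren at absolute position e = p + 1 + q
        have hq0 : 0 ≤ PySem.Chars.find (cs.drop (p + 1)) [')'] := by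
          have := (PySem.Chars.find_ne_neg_one_iff (cs.drop (p + 1)) [')']).mp hq
          exact (PySem.Chars.find_nonneg_iff _ _).mpr this
        rw [if_neg hq]
        obtain ⟨hdropQ, hnoQ, hqlen⟩ := pv_find_decomp (cs.drop (p + 1)) ')' hq0
        set q := (PySem.Chars.find (cs.drop (p + 1)) [')']).toNat with hqdef
        set e := p + 1 + q with hedef
        have hcast2 : (p : Int) + (1 + PySem.Chars.find (cs.drop (p + 1)) [')']) = (e : Int) := by
          omega
        have hne : ¬ ((1 : Int) + PySem.Chars.find (cs.drop (p + 1)) [')'] = -1) := by omega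
        rw [if_neg hne, hcast2]
        rw [if_neg (by omega : ¬ ((e : Int) = -1))]
        have hlenp : (cs.drop (p + 1)).length = cs.length - (p + 1) := by simp
        have he_lt : e < cs.length := by omega
        have hdropE : cs.drop e = ')' :: cs.drop (e + 1) := by
          have h1 : (cs.drop (p + 1)).drop q = cs.drop e := by
            rw [List.drop_drop]
          have h2 : (cs.drop (p + 1)).drop (q + 1) = cs.drop (e + 1) := by
            rw [List.drop_drop]; congr 1
          rw [← h1, ← h2]; exact hdropQ
        -- the slice is exactly the chars B accumulated
        have hbs : PySem.Chars.slice cs (some ((p : Int) + 1)) (some (e : Int)) =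
            (cs.drop (p + 1)).take q := by
          show PySem.List.slice cs (some ((p : Int) + 1)) (some (e : Int)) = _
          have : ((p : Int) + 1) = ((p + 1 : Nat) : Int) := by push_cast; ring
          rw [this, PySem.List.slice_natCast]
          congr 1
          omega
        rw [hbs]
        -- recursive call = IH at e
        rw [ih e f _ (by omega) (by omega) (by omega)]
        rw [hdropE]
        -- B: close the group at e
        have hBmid : ∀ a : List (List Int),
            List.foldl pvBStep (a, some []) (cs.drop (p + 1)) =
            List.foldl pvBStep
              ((if (cs.drop (p + 1)).take q ≠ [] then a ++ [pvGroupVal ((cs.drop (p + 1)).take q)] else a),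
               none) (cs.drop (e + 1)) := by
          intro a
          have hsplitM : cs.drop (p + 1) = (cs.drop (p + 1)).take q ++ ')' :: cs.drop (e + 1) := by
            conv_lhs => rw [← List.take_append_drop q (cs.drop (p + 1))]
            congr 1
            rw [List.drop_drop, show p + 1 + q = e from rfl, hdropE]
          conv_lhs => rw [hsplitM]
          rw [List.foldl_append, pv_foldl_some_no_close _ _ _ hnoQ]
          simp only [List.nil_append, List.foldl_cons, pvBStep]
          rfl
        rw [hBpre, hBmid]
        simp [pvBStep]

-- ===== VERDICT (by name: the statement is the Claim_ definition above) =====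
theorem parse_machine_line_spec : Claim_equal_parse_machine_line := by
  intro line _ _
  unfold Spec_parse_machine_line parse_machine_line parse_machine_line_alt
  have h := pv_main line.toList line.toList.length 0 (line.toList.length + 1) []
    (by omega) (by omega) (by omega)
  simp only [Nat.cast_zero, PySem.Chars.findFrom_zero, List.drop_zero] at h
  exact congrArg (fun x => (pvJoltage line.toList, x)) h
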